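-- pv_equiv track=rewrite | github.com/HypeDis/DailyCodingProblem-Book | Email/54_sudoku_solver.py | colIsValid
-- ===== SOURCE A (Python) =====
-- def colIsValid(board, row, col):
--     curVal = board[row][col]
--     for i in range(9):
--         if i == row:
--             continue
--         if board[i][col] == curVal:
--             return False
--     return True
-- ===== SOURCE B (Python) =====
-- def colIsValid(board, row, col):
--     curVal = board[row][col]
--     def ok(i):
--         return i == 9 or ((i == row or board[i][col] != curVal) and ok(i + 1))
--     return ok(0)
-- ===== Notes on version B (the rewrite author's own statement) =====
-- stated objective: alternative
-- what changed: B replaces A's imperative skip-own-row loop with continue/early-return by a recursive boolean predicate ok(i) built from or/and short-circuiting, with no skip branch or return statement.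
import Mathlib
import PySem

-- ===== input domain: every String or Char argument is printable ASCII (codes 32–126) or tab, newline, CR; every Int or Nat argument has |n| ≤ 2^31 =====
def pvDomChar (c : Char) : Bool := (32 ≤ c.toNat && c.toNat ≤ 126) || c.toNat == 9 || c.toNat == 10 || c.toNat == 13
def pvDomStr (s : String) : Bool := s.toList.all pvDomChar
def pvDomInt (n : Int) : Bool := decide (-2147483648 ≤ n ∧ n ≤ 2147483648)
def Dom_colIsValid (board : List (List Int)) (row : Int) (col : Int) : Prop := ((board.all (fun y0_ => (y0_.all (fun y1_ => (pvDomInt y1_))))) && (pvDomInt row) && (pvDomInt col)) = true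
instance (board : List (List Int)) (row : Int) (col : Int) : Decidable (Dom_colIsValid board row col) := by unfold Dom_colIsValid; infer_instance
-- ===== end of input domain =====

-- B replaces the imperative skip-own-row loop (continue / early return) by a recursive
-- boolean predicate built from short-circuiting or/and; same cost, different decomposition.
-- Both ports read cells through the same total accessor; Pre_ states exactly the inputs on
-- which the Python raises no IndexError.

-- shared cell accessor: board[i][col] (total form; where Python raises both programs raise alike)
def pvCell (board : List (List Int)) (col i : Int) : Int :=
  PySem.List.pyGetD (PySem.List.pyGetD board i []) col 0

-- ===== PORT A =====
-- the 'for i in range(9)' loop with continue/early-return, as structural recursion on the index list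
def colIsValidGo (board : List (List Int)) (row col curVal : Int) : List Int → Bool
  | [] => true
  | i :: rest =>
    if i = row then colIsValidGo board row col curVal rest
    else if pvCell board col i = curVal then false
    else colIsValidGo board row col curVal rest

def colIsValid (board : List (List Int)) (row : Int) (col : Int) : Bool :=
  let curVal := pvCell board col row
  colIsValidGo board row col curVal (PySem.List.pyRange 0 9 1)

-- ===== PORT B =====
-- ok(i) = i == 9 or ((i == row or board[i][col] != curVal) and ok(i+1))
-- (the final 'else true' branch is unreachable from ok(0); it only makes the recursion total)
def colIsValidOk (board : List (List Int)) (row col curVal i : Int) : Bool :=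
  if i = 9 then true
  else if h : i < 9 then
    ((i == row) || !(pvCell board col i == curVal)) && colIsValidOk board row col curVal (i + 1)
  else true
termination_by (9 - i).toNat
decreasing_by omega

def colIsValid_alt (board : List (List Int)) (row : Int) (col : Int) : Bool :=
  let curVal := pvCell board col row
  colIsValidOk board row col curVal 0

-- ===== PRECONDITION & SPEC =====
-- board[i][col] as an Option (none exactly where Python's indexing raises); used only by Pre_
def pvCellOpt (board : List (List Int)) (col i : Int) : Option Int :=
  (PySem.List.pyGet? board i).bind (fun r => PySem.List.pyGet? r col)

-- exactly the inputs on which Python A returns: board[row][col] exists, and the scan either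
-- reads all nine cells of the column (skipping row) or hits a duplicate of curVal before the
-- first unreadable cell (the early 'return False')
def Pre_colIsValid (board : List (List Int)) (row : Int) (col : Int) : Prop :=
  (pvCellOpt board col row).isSome ∧
  ((∀ i ∈ PySem.List.pyRange 0 9 1, i ≠ row → (pvCellOpt board col i).isSome) ∨
   (∃ j ∈ PySem.List.pyRange 0 9 1, j ≠ row ∧ pvCellOpt board col j = pvCellOpt board col row ∧
      ∀ i ∈ PySem.List.pyRange 0 j 1, i ≠ row → (pvCellOpt board col i).isSome))
instance (board : List (List Int)) (row : Int) (col : Int) : Decidable (Pre_colIsValid board row col) := by unfold Pre_colIsValid; infer_instance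

def pvWitness_colIsValid : List (List Int) × Int × Int :=
  ([[1],[2],[3],[4],[5],[6],[7],[8],[9]], 0, 0)

def Spec_colIsValid (board : List (List Int)) (row : Int) (col : Int) (out : Bool) : Prop := out = colIsValid_alt board row col
instance (board : List (List Int)) (row : Int) (col : Int) (out : Bool) : Decidable (Spec_colIsValid board row col out) := by unfold Spec_colIsValid; infer_instance

-- ===== CLAIM (what is proved, stated in full; the proofs are below) =====
def Claim_equal_colIsValid : Prop := ∀ (board : List (List Int)) (row : Int) (col : Int), Dom_colIsValid board row col → Pre_colIsValid board row col → Spec_colIsValid board row col (colIsValid board row col)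

-- ===== LEMMAS AND PROOFS =====

-- A's scan over the remaining indices [i, 9) equals B's recursive predicate started at i
theorem go_eq_ok (board : List (List Int)) (row col curVal : Int) :
    ∀ (fuel : Nat) (i : Int), (9 - i).toNat ≤ fuel → 0 ≤ i → i ≤ 9 →
      colIsValidGo board row col curVal (PySem.List.pyRange i 9 1)
        = colIsValidOk board row col curVal i := by
  intro fuel
  induction fuel with
  | zero =>
    intro i hf h0 h9
    have : i = 9 := by omega
    subst this
    rw [PySem.List.pyRange_one_eq_nil (by omega)]
    simp [colIsValidGo, colIsValidOk]
  | succ n ih =>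
    intro i hf h0 h9
    by_cases h9' : i = 9
    · subst h9'
      rw [PySem.List.pyRange_one_eq_nil (by omega)]
      simp [colIsValidGo, colIsValidOk]
    · have hlt : i < 9 := by omega
      rw [PySem.List.pyRange_one_cons hlt]
      rw [colIsValidOk]
      simp only [h9', if_false, hlt, dif_pos]
      by_cases hr : i = row
      · have h' := ih (i + 1) (by omega) (by omega) (by omega)
        rw [hr] at h'
        simp [colIsValidGo, hr, h']
      · by_cases hv : pvCell board col i = curVal
        · simp [colIsValidGo, hr, hv]
        · simp [colIsValidGo, hr, hv, ih (i + 1) (by omega) (by omega) (by omega)]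

-- ===== VERDICT (by name: the statement is the Claim_ definition above) =====
theorem colIsValid_spec : Claim_equal_colIsValid := by
  intro board row col _ _
  unfold Spec_colIsValid colIsValid colIsValid_alt
  exact go_eq_ok board row col _ 9 0 (by omega) (by omega) (by omega)
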